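-- pv_equiv track=rewrite | github.com/russford/advent2020 | day11.py | iterate_grid_2
-- ===== SOURCE A (Python) =====
-- directions = [(a, b) for a in range(-1, 2) for b in range(-1, 2) if a or b]
--
-- def count_grid_2 (grid, x, y, c):
--     count = 0
--     for i,j in directions:
--         dist = 1
--         while 0 <= x + dist*i < len(grid) and 0 <= y + j*dist < len(grid[0]) and grid[x+dist*i][y+dist*j] == ".":
--             dist += 1
--         if 0 <= x + dist*i < len(grid) and 0 <= y + j*dist < len(grid[0]) and grid[x+dist*i][y+dist*j] == c:
--             count += 1
--     return count
--
-- def iterate_grid_2(grid):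
--     g2 = [g.copy() for g in grid]
--     for i in range(len(grid)):
--         for j in range(len(grid[0])):
--             if grid[i][j] == "L" and count_grid_2(grid, i, j, "#") == 0:
--                 g2[i][j] = "#"
--             if grid[i][j] == "#" and count_grid_2(grid, i, j, "#") >= 5:
--                 g2[i][j] = "L"
--     return [g for g in g2]
-- ===== SOURCE B (Python) =====
-- # Alternative algorithm: per-direction DP sweeps compute the nearest visible
-- # non-floor cell once per cell, instead of re-walking every ray from every seat.
--
-- def _step_row(prev, grow, b, m):
--     cur = []
--     for j in range(m):
--         pj = j + b
--         if 0 <= pj < m: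
--             v = grow[pj]
--             cur.append(v if v != "." else prev[pj])
--         else:
--             cur.append(None)
--     return cur
--
-- def _near_up(grid, b, n, m):
--     rows, prev = [], [None] * m
--     for i in range(n):
--         if i > 0:
--             prev = _step_row(prev, grid[i - 1], b, m)
--         rows.append(prev)
--     return rows
--
-- def _near_down(grid, b, n, m):
--     rows, prev = [], [None] * m
--     for i in reversed(range(n)):
--         if i < n - 1:
--             prev = _step_row(prev, grid[i + 1], b, m)
--         rows.append(prev)
--     rows.reverse()
--     return rows
--
-- def _near_left(row, m):
--     cur, last = [], None
--     for j in range(m):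
--         cur.append(last)
--         if row[j] != ".":
--             last = row[j]
--     return cur
--
-- def _near_right(row, m):
--     cur, last = [], None
--     for j in reversed(range(m)):
--         cur.append(last)
--         if row[j] != ".":
--             last = row[j]
--     cur.reverse()
--     return cur
--
-- def iterate_grid_2(grid):
--     n, m = len(grid), (len(grid[0]) if grid else 0)
--     mats = []
--     for b in (-1, 0, 1):
--         mats.append(_near_up(grid, b, n, m))
--         mats.append(_near_down(grid, b, n, m))
--     mats.append([_near_left(row, m) for row in grid])
--     mats.append([_near_right(row, m) for row in grid])
--     out = []
--     for i, row in enumerate(grid):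
--         new = list(row)
--         for j in range(m):
--             cnt = sum(1 for mat in mats if mat[i][j] == "#")
--             c = row[j]
--             if c == "L" and cnt == 0:
--                 new[j] = "#"
--             elif c == "#" and cnt >= 5:
--                 new[j] = "L"
--         out.append(new)
--     return out
-- ===== Notes on version B (the rewrite author's own statement) =====
-- stated objective: alternative
-- what changed: replaced per-seat ray walking (re-scanning every line of sight from every seat) with eight direction-wise DP sweeps that precompute the nearest visible non-floor cell for every cell, then count per cell from those tables
import Mathlib
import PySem

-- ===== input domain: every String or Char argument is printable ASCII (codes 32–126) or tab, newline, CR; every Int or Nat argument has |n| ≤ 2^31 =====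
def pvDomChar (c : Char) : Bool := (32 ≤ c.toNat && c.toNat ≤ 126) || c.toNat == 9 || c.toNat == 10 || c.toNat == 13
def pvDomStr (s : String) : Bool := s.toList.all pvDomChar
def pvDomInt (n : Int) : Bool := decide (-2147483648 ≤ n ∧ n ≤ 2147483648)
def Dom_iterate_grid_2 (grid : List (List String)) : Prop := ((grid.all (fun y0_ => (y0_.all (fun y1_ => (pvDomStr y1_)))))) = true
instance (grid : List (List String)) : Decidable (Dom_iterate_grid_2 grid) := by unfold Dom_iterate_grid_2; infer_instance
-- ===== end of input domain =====

-- ===== PORT A =====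
-- B replaces A's per-seat ray walking with eight direction-wise DP sweeps (nearest
-- visible non-floor cell per direction, computed once per grid); objective: alternative.

def pvN (grid : List (List String)) : Int := (grid.length : Int)

def pvM (grid : List (List String)) : Int := ((grid.headD []).length : Int)

-- grid[x][y] (total form; every use is guarded by 0 <= x < pvN, 0 <= y <= row length)
def pvCell (grid : List (List String)) (x y : Int) : String :=
  PySem.List.pyGetD (PySem.List.pyGetD grid x []) y ""

-- directions = [(a, b) for a in range(-1, 2) for b in range(-1, 2) if a or b]
def pvDirections : List (Int × Int) :=
  (PySem.List.pyRange (-1) 2 1).flatMap (fun a =>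
    (PySem.List.pyRange (-1) 2 1).filterMap (fun b =>
      if a ≠ 0 ∨ b ≠ 0 then some (a, b) else none))

-- the while-loop of count_grid_2; fuel pvFuel always suffices (proved in the lemmas)
def pvWalk (grid : List (List String)) (x y a b : Int) : Nat → Int → Int
  | 0, dist => dist
  | fuel + 1, dist =>
    if 0 ≤ x + dist * a ∧ x + dist * a < pvN grid ∧ 0 ≤ y + b * dist ∧ y + b * dist < pvM grid ∧
        pvCell grid (x + dist * a) (y + dist * b) = "." then
      pvWalk grid x y a b fuel (dist + 1)
    else dist

def pvFuel (grid : List (List String)) : Nat := grid.length + (grid.headD []).length + 2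

def count_grid_2 (grid : List (List String)) (x y : Int) (c : String) : Int :=
  pvDirections.foldl (fun count d =>
    let dist := pvWalk grid x y d.1 d.2 (pvFuel grid) 1
    if 0 ≤ x + dist * d.1 ∧ x + dist * d.1 < pvN grid ∧ 0 ≤ y + d.2 * dist ∧
        y + d.2 * dist < pvM grid ∧ pvCell grid (x + dist * d.1) (y + dist * d.2) = c then
      count + 1
    else count) 0

def iterate_grid_2 (grid : List (List String)) : List (List String) :=
  let g2 := grid.map (fun g => g)
  (List.range grid.length).foldl (fun g2 (i : Nat) =>
    (List.range (grid.headD []).length).foldl (fun g2 (j : Nat) =>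
      let g2 := if pvCell grid (i : Int) (j : Int) = "L" ∧
          count_grid_2 grid (i : Int) (j : Int) "#" = 0 then
          g2.set i ((g2.getD i []).set j "#") else g2
      if pvCell grid (i : Int) (j : Int) = "#" ∧ 5 ≤ count_grid_2 grid (i : Int) (j : Int) "#" then
        g2.set i ((g2.getD i []).set j "L") else g2) g2) g2

-- ===== PORT B =====
def stepRow (prev : List (Option String)) (grow : List String) (b : Int) (m : Nat) :
    List (Option String) :=
  (List.range m).map (fun (j : Nat) =>
    let pj : Int := (j : Int) + b
    if 0 ≤ pj ∧ pj < (m : Int) then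
      (if PySem.List.pyGetD grow pj "" ≠ "." then some (PySem.List.pyGetD grow pj "")
       else PySem.List.pyGetD prev pj none)
    else none)

def nearUp (grid : List (List String)) (b : Int) (n m : Nat) : List (List (Option String)) :=
  ((List.range n).foldl
    (fun (st : List (List (Option String)) × List (Option String)) i =>
      let prev := if 0 < i then stepRow st.2 (grid.getD (i - 1) []) b m else st.2
      (st.1 ++ [prev], prev))
    ([], List.replicate m none)).1

def nearDown (grid : List (List String)) (b : Int) (n m : Nat) : List (List (Option String)) :=
  (((List.range n).reverse.foldl
    (fun (st : List (List (Option String)) × List (Option String)) i =>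
      let prev := if i < n - 1 then stepRow st.2 (grid.getD (i + 1) []) b m else st.2
      (st.1 ++ [prev], prev))
    ([], List.replicate m none)).1).reverse

def nearLeft (row : List String) (m : Nat) : List (Option String) :=
  ((List.range m).foldl
    (fun (st : List (Option String) × Option String) j =>
      (st.1 ++ [st.2], if row.getD j "" ≠ "." then some (row.getD j "") else st.2))
    ([], none)).1

def nearRight (row : List String) (m : Nat) : List (Option String) :=
  (((List.range m).reverse.foldl
    (fun (st : List (Option String) × Option String) j =>
      (st.1 ++ [st.2], if row.getD j "" ≠ "." then some (row.getD j "") else st.2))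
    ([], none)).1).reverse

def iterate_grid_2_alt (grid : List (List String)) : List (List String) :=
  let n := grid.length
  let m := (grid.headD []).length
  let mats := ([(-1 : Int), 0, 1]).foldl
    (fun ms b => ms ++ [nearUp grid b n m, nearDown grid b n m]) []
  let mats := mats ++ [grid.map (fun row => nearLeft row m), grid.map (fun row => nearRight row m)]
  (PySem.List.enumerate grid 0).map (fun p =>
    (List.range m).foldl (fun newr (j : Nat) =>
      let cnt := mats.foldl (fun s mat =>
        if PySem.List.pyGetD (PySem.List.pyGetD mat p.1 []) ((j : Nat) : Int) none = some "#" then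
          s + (1 : Int) else s) 0
      let c := p.2.getD j ""
      if c = "L" ∧ cnt = 0 then newr.set j "#"
      else if c = "#" ∧ 5 ≤ cnt then newr.set j "L"
      else newr) p.2)

-- ===== PRECONDITION & SPEC =====
-- Pre_ excludes exactly the inputs on which A raises IndexError: ragged grids with
-- a row shorter than row 0 (grid[i][j] fails there).
def Pre_iterate_grid_2 (grid : List (List String)) : Prop :=
  ∀ row ∈ grid, (grid.headD []).length ≤ row.length

instance (grid : List (List String)) : Decidable (Pre_iterate_grid_2 grid) := by
  unfold Pre_iterate_grid_2; infer_instance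

def pvWitness_iterate_grid_2 : List (List String) :=
  [["L", ".", "#"], [".", ".", "."], ["#", ".", "L"]]

def Spec_iterate_grid_2 (grid : List (List String)) (out : List (List String)) : Prop :=
  out = iterate_grid_2_alt grid

instance (grid : List (List String)) (out : List (List String)) :
    Decidable (Spec_iterate_grid_2 grid out) := by
  unfold Spec_iterate_grid_2; infer_instance

-- ===== CLAIM (what is proved, stated in full; the proofs are below) =====
def Claim_equal_iterate_grid_2 : Prop := ∀ (grid : List (List String)),
  Dom_iterate_grid_2 grid → Pre_iterate_grid_2 grid →
    Spec_iterate_grid_2 grid (iterate_grid_2 grid)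

-- ===== LEMMAS AND PROOFS =====

-- first value of a non-"." cell visible from (x, y) in direction (a, b), with fuel
def visF (grid : List (List String)) (a b : Int) : Nat → Int → Int → Option String
  | 0, _, _ => none
  | fuel + 1, x, y =>
    if 0 ≤ x + a ∧ x + a < pvN grid ∧ 0 ≤ y + b ∧ y + b < pvM grid then
      (if pvCell grid (x + a) (y + b) = "." then visF grid a b fuel (x + a) (y + b)
       else some (pvCell grid (x + a) (y + b)))
    else none

def vis (grid : List (List String)) (a b x y : Int) : Option String :=
  visF grid a b (pvFuel grid) x y

-- upper bound on the number of look-ahead steps from (x, y) in direction (a, b)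
def steps (grid : List (List String)) (a b x y : Int) : Nat :=
  if a = 1 then (pvN grid - x).toNat
  else if a = -1 then (x + 1).toNat
  else if b = 1 then (pvM grid - y).toNat
  else (y + 1).toNat

def dirOK (a b : Int) : Prop := (a = 1 ∨ a = -1) ∨ (a = 0 ∧ (b = 1 ∨ b = -1))

theorem steps_zero_out (grid : List (List String)) (a b : Int) (hab : dirOK a b)
    (x y : Int) (h : steps grid a b x y = 0) :
    ¬ (0 ≤ x + a ∧ x + a < pvN grid ∧ 0 ≤ y + b ∧ y + b < pvM grid) := by
  rcases hab with (h1 | h1) | ⟨h0, h1 | h1⟩ <;> subst_vars <;>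
    norm_num [steps] at h <;> intro hc <;> omega

theorem steps_step (grid : List (List String)) (a b : Int) (hab : dirOK a b) (x y : Int)
    (h1 : 0 ≤ x + a) (h2 : x + a < pvN grid) (h3 : 0 ≤ y + b) (h4 : y + b < pvM grid) :
    steps grid a b (x + a) (y + b) + 1 = steps grid a b x y := by
  rcases hab with (ha | ha) | ⟨ha, hb | hb⟩ <;> subst_vars <;>
    norm_num [steps] <;> omega

theorem visF_none (grid : List (List String)) (a b : Int) (hab : dirOK a b) (f : Nat)
    (x y : Int) (h : steps grid a b x y = 0) : visF grid a b f x y = none := by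
  cases f with
  | zero => rfl
  | succ f =>
    show (if 0 ≤ x + a ∧ x + a < pvN grid ∧ 0 ≤ y + b ∧ y + b < pvM grid then _ else none) = none
    rw [if_neg (steps_zero_out grid a b hab x y h)]

theorem visF_stable (grid : List (List String)) (a b : Int) (hab : dirOK a b) :
    ∀ (f1 : Nat) (x y : Int) (f2 : Nat), steps grid a b x y ≤ f1 → steps grid a b x y ≤ f2 →
      visF grid a b f1 x y = visF grid a b f2 x y := by
  intro f1
  induction f1 with
  | zero =>
    intro x y f2 h1 h2
    rw [visF_none grid a b hab _ x y (by omega), visF_none grid a b hab _ x y (by omega)]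
  | succ f1 ih =>
    intro x y f2 h1 h2
    cases f2 with
    | zero =>
      rw [visF_none grid a b hab _ x y (by omega), visF_none grid a b hab _ x y (by omega)]
    | succ f2 =>
      show (if _ then _ else none) = (if _ then _ else none)
      by_cases hC : 0 ≤ x + a ∧ x + a < pvN grid ∧ 0 ≤ y + b ∧ y + b < pvM grid
      · rw [if_pos hC, if_pos hC]
        by_cases hdot : pvCell grid (x + a) (y + b) = "."
        · rw [if_pos hdot, if_pos hdot]
          have hs := steps_step grid a b hab x y hC.1 hC.2.1 hC.2.2.1 hC.2.2.2
          exact ih (x + a) (y + b) f2 (by omega) (by omega)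
        · rw [if_neg hdot, if_neg hdot]
      · rw [if_neg hC, if_neg hC]

theorem walk_vis (grid : List (List String)) (a b : Int) (hab : dirOK a b) (x y : Int) :
    ∀ (fuel : Nat) (d u v : Int), u = x + (d - 1) * a → v = y + (d - 1) * b →
      steps grid a b u v ≤ fuel →
      (if 0 ≤ x + (pvWalk grid x y a b fuel d) * a ∧
          x + (pvWalk grid x y a b fuel d) * a < pvN grid ∧
          0 ≤ y + b * (pvWalk grid x y a b fuel d) ∧
          y + b * (pvWalk grid x y a b fuel d) < pvM grid then
        some (pvCell grid (x + (pvWalk grid x y a b fuel d) * a)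
          (y + (pvWalk grid x y a b fuel d) * b))
      else none) = visF grid a b fuel u v := by
  intro fuel
  induction fuel with
  | zero =>
    intro d u v hu hv hs
    simp only [pvWalk]
    have h0 := steps_zero_out grid a b hab u v (by omega)
    have e1 : u + a = x + d * a := by rw [hu]; ring
    have e2 : v + b = y + b * d := by rw [hv]; ring
    rw [e1, e2] at h0
    simp only [visF]
    exact if_neg h0
  | succ fuel ih =>
    intro d u v hu hv hs
    simp only [pvWalk]
    have e1 : u + a = x + d * a := by rw [hu]; ring
    have e2 : v + b = y + b * d := by rw [hv]; ring
    have e2' : v + b = y + d * b := by rw [hv]; ring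
    by_cases hw : 0 ≤ x + d * a ∧ x + d * a < pvN grid ∧ 0 ≤ y + b * d ∧ y + b * d < pvM grid ∧
        pvCell grid (x + d * a) (y + d * b) = "."
    · rw [if_pos hw]
      have hb1 : 0 ≤ u + a := by rw [e1]; exact hw.1
      have hb2 : u + a < pvN grid := by rw [e1]; exact hw.2.1
      have hb3 : 0 ≤ v + b := by rw [e2]; exact hw.2.2.1
      have hb4 : v + b < pvM grid := by rw [e2]; exact hw.2.2.2.1
      have hcell : pvCell grid (u + a) (v + b) = "." := by rw [e1, e2']; exact hw.2.2.2.2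
      have hrhs : visF grid a b (fuel + 1) u v = visF grid a b fuel (u + a) (v + b) := by
        simp only [visF]
        rw [if_pos ⟨hb1, hb2, hb3, hb4⟩, if_pos hcell]
      rw [hrhs]
      exact ih (d + 1) (u + a) (v + b) (by rw [hu]; ring) (by rw [hv]; ring)
        (by have := steps_step grid a b hab u v hb1 hb2 hb3 hb4; omega)
    · rw [if_neg hw]
      simp only [visF]
      by_cases hbb : 0 ≤ x + d * a ∧ x + d * a < pvN grid ∧ 0 ≤ y + b * d ∧ y + b * d < pvM grid
      · rw [if_pos hbb,
          if_pos (show 0 ≤ u + a ∧ u + a < pvN grid ∧ 0 ≤ v + b ∧ v + b < pvM grid by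
            rw [e1, e2]; exact hbb)]
        have hnd : ¬ pvCell grid (u + a) (v + b) = "." := by
          rw [e1, e2']
          intro hcc
          exact hw ⟨hbb.1, hbb.2.1, hbb.2.2.1, hbb.2.2.2, hcc⟩
        rw [if_neg hnd, e1, e2']
      · rw [if_neg hbb,
          if_neg (show ¬ (0 ≤ u + a ∧ u + a < pvN grid ∧ 0 ≤ v + b ∧ v + b < pvM grid) by
            rw [e1, e2]; exact hbb)]

def ind (grid : List (List String)) (a b x y : Int) : Int :=
  if vis grid a b x y = some "#" then 1 else 0

theorem steps_le_fuel (grid : List (List String)) (a b : Int) (hab : dirOK a b) (x y : Int)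
    (hx : 0 ≤ x) (hx' : x < pvN grid) (hy : 0 ≤ y) (hy' : y < pvM grid) :
    steps grid a b x y ≤ pvFuel grid := by
  have h1 : pvN grid = (grid.length : Int) := rfl
  have h2 : pvM grid = ((grid.headD []).length : Int) := rfl
  have h3 : pvFuel grid = grid.length + (grid.headD []).length + 2 := rfl
  rcases hab with (ha | ha) | ⟨ha, hb | hb⟩ <;> subst_vars <;> simp only [steps] <;>
    norm_num <;> omega

theorem dir_term (grid : List (List String)) (a b : Int) (hab : dirOK a b) (x y : Int)
    (hx : 0 ≤ x) (hx' : x < pvN grid) (hy : 0 ≤ y) (hy' : y < pvM grid) (count : Int) :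
    (if 0 ≤ x + (pvWalk grid x y a b (pvFuel grid) 1) * a ∧
        x + (pvWalk grid x y a b (pvFuel grid) 1) * a < pvN grid ∧
        0 ≤ y + b * (pvWalk grid x y a b (pvFuel grid) 1) ∧
        y + b * (pvWalk grid x y a b (pvFuel grid) 1) < pvM grid ∧
        pvCell grid (x + (pvWalk grid x y a b (pvFuel grid) 1) * a)
          (y + (pvWalk grid x y a b (pvFuel grid) 1) * b) = "#" then
      count + 1
    else count) = count + ind grid a b x y := by
  have hv := walk_vis grid a b hab x y (pvFuel grid) 1 x y (by ring) (by ring)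
    (steps_le_fuel grid a b hab x y hx hx' hy hy')
  rw [ind, vis]
  by_cases hbb : 0 ≤ x + (pvWalk grid x y a b (pvFuel grid) 1) * a ∧
      x + (pvWalk grid x y a b (pvFuel grid) 1) * a < pvN grid ∧
      0 ≤ y + b * (pvWalk grid x y a b (pvFuel grid) 1) ∧
      y + b * (pvWalk grid x y a b (pvFuel grid) 1) < pvM grid
  · rw [if_pos hbb] at hv
    by_cases hc : pvCell grid (x + (pvWalk grid x y a b (pvFuel grid) 1) * a)
        (y + (pvWalk grid x y a b (pvFuel grid) 1) * b) = "#"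
    · rw [if_pos ⟨hbb.1, hbb.2.1, hbb.2.2.1, hbb.2.2.2, hc⟩, if_pos (by rw [← hv, hc])]
    · rw [if_neg (by intro hcon; exact hc hcon.2.2.2.2), if_neg (by rw [← hv]; simpa using hc)]
      omega
  · rw [if_neg (by intro hcon; exact hbb ⟨hcon.1, hcon.2.1, hcon.2.2.1, hcon.2.2.2.1⟩)]
    rw [if_neg hbb] at hv
    rw [if_neg (by rw [← hv]; simp)]
    omega

theorem countA (grid : List (List String)) (x y : Int)
    (hx : 0 ≤ x) (hx' : x < pvN grid) (hy : 0 ≤ y) (hy' : y < pvM grid) :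
    count_grid_2 grid x y "#" =
      ind grid (-1) (-1) x y + ind grid (-1) 0 x y + ind grid (-1) 1 x y +
      ind grid 0 (-1) x y + ind grid 0 1 x y +
      ind grid 1 (-1) x y + ind grid 1 0 x y + ind grid 1 1 x y := by
  have hdirs : pvDirections = [(-1, -1), (-1, 0), (-1, 1), (0, -1), (0, 1), (1, -1), (1, 0), (1, 1)] := by decide
  rw [count_grid_2, hdirs]
  simp only [List.foldl]
  rw [dir_term grid (-1) (-1) (by left; right; rfl) x y hx hx' hy hy',
      dir_term grid (-1) 0 (by left; right; rfl) x y hx hx' hy hy',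
      dir_term grid (-1) 1 (by left; right; rfl) x y hx hx' hy hy',
      dir_term grid 0 (-1) (by right; exact ⟨rfl, Or.inr rfl⟩) x y hx hx' hy hy',
      dir_term grid 0 1 (by right; exact ⟨rfl, Or.inl rfl⟩) x y hx hx' hy hy',
      dir_term grid 1 (-1) (by left; left; rfl) x y hx hx' hy hy',
      dir_term grid 1 0 (by left; left; rfl) x y hx hx' hy hy',
      dir_term grid 1 1 (by left; left; rfl) x y hx hx' hy hy']
  ring

theorem steps_le_inb (grid : List (List String)) (a b : Int) (hab : dirOK a b) (u v : Int)
    (h1 : 0 ≤ u) (h2 : u < pvN grid) (h3 : 0 ≤ v) (h4 : v < pvM grid) :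
    steps grid a b u v ≤ grid.length + (grid.headD []).length + 1 := by
  have e1 : pvN grid = (grid.length : Int) := rfl
  have e2 : pvM grid = ((grid.headD []).length : Int) := rfl
  have e3 : ((grid.headD []).length : Int) = ((grid.head?.getD []).length : Int) := by
    cases grid <;> rfl
  rcases hab with (ha | ha) | ⟨ha, hb | hb⟩ <;> subst_vars <;> simp only [steps] <;>
    norm_num <;> omega

theorem visF_succ (grid : List (List String)) (a b : Int) (f : Nat) (x y : Int) :
    visF grid a b (f + 1) x y =
      if 0 ≤ x + a ∧ x + a < pvN grid ∧ 0 ≤ y + b ∧ y + b < pvM grid then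
        (if pvCell grid (x + a) (y + b) = "." then visF grid a b f (x + a) (y + b)
         else some (pvCell grid (x + a) (y + b)))
      else none := rfl

theorem vis_unfold (grid : List (List String)) (a b : Int) (hab : dirOK a b) (x y : Int) :
    vis grid a b x y =
      if 0 ≤ x + a ∧ x + a < pvN grid ∧ 0 ≤ y + b ∧ y + b < pvM grid then
        (if pvCell grid (x + a) (y + b) = "." then vis grid a b (x + a) (y + b)
         else some (pvCell grid (x + a) (y + b)))
      else none := by
  have hf : pvFuel grid = (grid.length + (grid.headD []).length + 1) + 1 := rfl
  conv_lhs => rw [vis, hf, visF_succ]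
  by_cases hC : 0 ≤ x + a ∧ x + a < pvN grid ∧ 0 ≤ y + b ∧ y + b < pvM grid
  · rw [if_pos hC, if_pos hC]
    by_cases hdot : pvCell grid (x + a) (y + b) = "."
    · rw [if_pos hdot, if_pos hdot, vis, hf]
      have hs := steps_le_inb grid a b hab (x + a) (y + b) hC.1 hC.2.1 hC.2.2.1 hC.2.2.2
      exact visF_stable grid a b hab _ (x + a) (y + b) _ (by omega) (by omega)
    · rw [if_neg hdot, if_neg hdot]
  · rw [if_neg hC, if_neg hC]

theorem pyGetD_nonneg_getD {α : Type} (l : List α) (t : Int) (d : α) (h : 0 ≤ t) :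
    PySem.List.pyGetD l t d = l.getD t.toNat d := by
  obtain ⟨n, rfl⟩ := Int.eq_ofNat_of_zero_le h
  simp [PySem.List.pyGetD_natCast]

theorem getD_map_range' {α : Type} (f : Nat → α) (m j : Nat) (d : α) (hj : j < m) :
    ((List.range m).map f).getD j d = f j := by
  rw [List.getD_eq_getElem?_getD]
  simp [List.getElem?_map, List.getElem?_range hj]

def specU (grid : List (List String)) (b : Int) : Nat → List (Option String)
  | 0 => List.replicate (grid.headD []).length none
  | i + 1 => stepRow (specU grid b i) (grid.getD i []) b (grid.headD []).length

theorem stepRow_getD (prev : List (Option String)) (grow : List String) (b : Int) (m j : Nat)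
    (hj : j < m) :
    (stepRow prev grow b m).getD j none =
      (if 0 ≤ (j : Int) + b ∧ (j : Int) + b < (m : Int) then
        (if PySem.List.pyGetD grow ((j : Int) + b) "" ≠ "." then
          some (PySem.List.pyGetD grow ((j : Int) + b) "")
         else PySem.List.pyGetD prev ((j : Int) + b) none)
      else none) := by
  rw [stepRow, getD_map_range' _ m j none hj]

theorem dirOK_up (b : Int) : dirOK (-1) b := Or.inl (Or.inr rfl)
theorem dirOK_down (b : Int) : dirOK 1 b := Or.inl (Or.inl rfl)

theorem pvM_eq (grid : List (List String)) : pvM grid = ((grid.headD []).length : Int) := rfl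
theorem pvN_eq (grid : List (List String)) : pvN grid = (grid.length : Int) := rfl

theorem pvCell_eq (grid : List (List String)) (i : Nat) (t : Int) (ht : 0 ≤ t) :
    pvCell grid (i : Int) t = PySem.List.pyGetD (grid.getD i []) t "" := by
  rw [pvCell, PySem.List.pyGetD_natCast]

theorem specU_getD (grid : List (List String)) (b : Int) :
    ∀ i, i ≤ grid.length → ∀ j, j < (grid.headD []).length →
      (specU grid b i).getD j none = vis grid (-1) b (i : Int) (j : Int) := by
  intro i
  induction i with
  | zero =>
    intro _ j hj
    rw [vis_unfold grid (-1) b (dirOK_up b), if_neg (by intro hc; omega)]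
    simp [specU, List.getD_eq_getElem?_getD]
  | succ i ih =>
    intro hi j hj
    have ei : (((i + 1 : Nat)) : Int) + -1 = (i : Int) := by push_cast; ring
    rw [specU, stepRow_getD _ _ _ _ j hj, vis_unfold grid (-1) b (dirOK_up b), pvM_eq grid, ei]
    by_cases hcol : 0 ≤ (j : Int) + b ∧ (j : Int) + b < ((grid.headD []).length : Int)
    · have hC : 0 ≤ (i : Int) ∧ (i : Int) < pvN grid ∧ 0 ≤ (j : Int) + b ∧
          (j : Int) + b < ((grid.headD []).length : Int) :=
        ⟨Int.natCast_nonneg i, by rw [pvN_eq]; omega, hcol.1, hcol.2⟩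
      rw [if_pos hcol, if_pos hC, pvCell_eq grid i _ hcol.1]
      by_cases hdot : PySem.List.pyGetD (grid.getD i []) ((j : Int) + b) "" = "."
      · have hjb : ((((j : Int) + b).toNat : Nat) : Int) = (j : Int) + b :=
          Int.toNat_of_nonneg hcol.1
        rw [if_neg (not_not_intro hdot), if_pos hdot, pyGetD_nonneg_getD _ _ _ hcol.1,
            ih (by omega) (((j : Int) + b).toNat) (by omega), hjb]
      · rw [if_pos hdot, if_neg hdot]
    · rw [if_neg hcol, if_neg (fun hc => hcol ⟨hc.2.2.1, hc.2.2.2⟩)]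

def specD (grid : List (List String)) (b : Int) : Nat → List (Option String)
  | 0 => List.replicate (grid.headD []).length none
  | k + 1 => stepRow (specD grid b k) (grid.getD (grid.length - 1 - k) []) b
      (grid.headD []).length

theorem specD_getD (grid : List (List String)) (b : Int) :
    ∀ k, k < grid.length → ∀ j, j < (grid.headD []).length →
      (specD grid b k).getD j none =
        vis grid 1 b ((grid.length - 1 - k : Nat) : Int) (j : Int) := by
  intro k
  induction k with
  | zero =>
    intro hk j hj
    rw [vis_unfold grid 1 b (dirOK_down b), pvN_eq grid, if_neg (by intro hc; omega)]
    simp [specD, List.getD_eq_getElem?_getD]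
  | succ k ih =>
    intro hk j hj
    have er : ((grid.length - 1 - (k + 1) : Nat) : Int) + 1 =
        ((grid.length - 1 - k : Nat) : Int) := by omega
    rw [specD, stepRow_getD _ _ _ _ j hj, vis_unfold grid 1 b (dirOK_down b), pvM_eq grid, er]
    by_cases hcol : 0 ≤ (j : Int) + b ∧ (j : Int) + b < ((grid.headD []).length : Int)
    · have hC : 0 ≤ ((grid.length - 1 - k : Nat) : Int) ∧
          ((grid.length - 1 - k : Nat) : Int) < pvN grid ∧
          0 ≤ (j : Int) + b ∧ (j : Int) + b < ((grid.headD []).length : Int) :=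
        ⟨Int.natCast_nonneg _, by rw [pvN_eq]; omega, hcol.1, hcol.2⟩
      rw [if_pos hcol, if_pos hC, pvCell_eq grid _ _ hcol.1]
      by_cases hdot : PySem.List.pyGetD (grid.getD (grid.length - 1 - k) []) ((j : Int) + b) ""
          = "."
      · have hjb : ((((j : Int) + b).toNat : Nat) : Int) = (j : Int) + b :=
          Int.toNat_of_nonneg hcol.1
        rw [if_neg (not_not_intro hdot), if_pos hdot, pyGetD_nonneg_getD _ _ _ hcol.1,
            ih (by omega) (((j : Int) + b).toNat) (by omega), hjb]
      · rw [if_pos hdot, if_neg hdot]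
    · rw [if_neg hcol, if_neg (fun hc => hcol ⟨hc.2.2.1, hc.2.2.2⟩)]

def specL (row : List String) : Nat → Option String
  | 0 => none
  | j + 1 => if row.getD j "" ≠ "." then some (row.getD j "") else specL row j

theorem dirOK_left : dirOK 0 (-1) := Or.inr ⟨rfl, Or.inr rfl⟩
theorem dirOK_right : dirOK 0 1 := Or.inr ⟨rfl, Or.inl rfl⟩

theorem specL_eq (grid : List (List String)) (i : Nat) (hi : i < grid.length) :
    ∀ j, j ≤ (grid.headD []).length →
      specL (grid.getD i []) j = vis grid 0 (-1) (i : Int) (j : Int) := by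
  intro j
  induction j with
  | zero =>
    intro _
    rw [vis_unfold grid 0 (-1) dirOK_left, if_neg (by intro hc; omega)]
    rfl
  | succ j ih =>
    intro hj
    have ej : (((j + 1 : Nat)) : Int) + -1 = (j : Int) := by push_cast; ring
    have e0 : (i : Int) + 0 = (i : Int) := by ring
    rw [specL, vis_unfold grid 0 (-1) dirOK_left, pvM_eq grid, pvN_eq grid, ej, e0]
    have hC : 0 ≤ (i : Int) ∧ (i : Int) < (grid.length : Int) ∧
        0 ≤ (j : Int) ∧ (j : Int) < ((grid.headD []).length : Int) :=
      ⟨by omega, by omega, by omega, by omega⟩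
    rw [if_pos hC, pvCell_eq grid i _ (by omega), PySem.List.pyGetD_natCast]
    by_cases hdot : (grid.getD i []).getD j "" = "."
    · rw [if_neg (not_not_intro hdot), if_pos hdot, ih (by omega)]
    · rw [if_pos hdot, if_neg hdot]

def specR (row : List String) (m : Nat) : Nat → Option String
  | 0 => none
  | k + 1 => if row.getD (m - 1 - k) "" ≠ "." then some (row.getD (m - 1 - k) "")
      else specR row m k

theorem specR_eq (grid : List (List String)) (i : Nat) (hi : i < grid.length) :
    ∀ k, k < (grid.headD []).length →
      specR (grid.getD i []) (grid.headD []).length k =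
        vis grid 0 1 (i : Int) (((grid.headD []).length - 1 - k : Nat) : Int) := by
  intro k
  induction k with
  | zero =>
    intro hk
    rw [vis_unfold grid 0 1 dirOK_right, pvM_eq grid, if_neg (by intro hc; omega)]
    rfl
  | succ k ih =>
    intro hk
    have ek : (((grid.headD []).length - 1 - (k + 1) : Nat) : Int) + 1 =
        (((grid.headD []).length - 1 - k : Nat) : Int) := by omega
    have e0 : (i : Int) + 0 = (i : Int) := by ring
    rw [specR, vis_unfold grid 0 1 dirOK_right, pvM_eq grid, pvN_eq grid, ek, e0]
    have hC : 0 ≤ (i : Int) ∧ (i : Int) < (grid.length : Int) ∧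
        0 ≤ (((grid.headD []).length - 1 - k : Nat) : Int) ∧
        (((grid.headD []).length - 1 - k : Nat) : Int) < ((grid.headD []).length : Int) :=
      ⟨by omega, by omega, by omega, by omega⟩
    rw [if_pos hC, pvCell_eq grid i _ (by omega), PySem.List.pyGetD_natCast]
    by_cases hdot : (grid.getD i []).getD ((grid.headD []).length - 1 - k) "" = "."
    · rw [if_neg (not_not_intro hdot), if_pos hdot, ih (by omega)]
    · rw [if_pos hdot, if_neg hdot]

theorem nearUp_pair (grid : List (List String)) (b : Int) : ∀ k,
    ((List.range k).foldl
      (fun (st : List (List (Option String)) × List (Option String)) i =>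
        let prev := if 0 < i then stepRow st.2 (grid.getD (i - 1) []) b
            (grid.headD []).length else st.2
        (st.1 ++ [prev], prev))
      ([], List.replicate (grid.headD []).length none))
    = ((List.range k).map (specU grid b), specU grid b (k - 1)) := by
  intro k
  induction k with
  | zero => simp [specU]
  | succ k ih =>
    rw [List.range_succ, List.foldl_append, ih]
    simp only [List.foldl, List.map_append, List.map_cons, List.map_nil]
    cases k with
    | zero => simp [specU]
    | succ s => simp [specU]

theorem nearUp_getD (grid : List (List String)) (b : Int) (i : Nat) (hi : i < grid.length) :
    (nearUp grid b grid.length (grid.headD []).length).getD i [] = specU grid b i := by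
  rw [nearUp, nearUp_pair grid b grid.length, getD_map_range' _ _ i [] hi]

theorem nearDown_pair (grid : List (List String)) (b : Int) : ∀ k, k ≤ grid.length →
    ∀ acc0 : List (List (Option String)),
    ((List.range k).reverse.foldl
      (fun (st : List (List (Option String)) × List (Option String)) i =>
        let prev := if i < grid.length - 1 then stepRow st.2 (grid.getD (i + 1) []) b
            (grid.headD []).length else st.2
        (st.1 ++ [prev], prev))
      (acc0, specD grid b (grid.length - 1 - k)))
    = (acc0 ++ (List.range k).map (fun t => specD grid b (grid.length - k + t)),
       specD grid b (grid.length - 1)) := by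
  intro k
  induction k with
  | zero =>
    intro _ acc0
    simp
  | succ k ih =>
    intro hk acc0
    have hrev : (List.range (k + 1)).reverse = k :: (List.range k).reverse := by
      rw [List.range_succ]; simp
    have hstep : (if k < grid.length - 1 then
          stepRow (specD grid b (grid.length - 1 - (k + 1))) (grid.getD (k + 1) []) b
            (grid.headD []).length
        else specD grid b (grid.length - 1 - (k + 1))) = specD grid b (grid.length - 1 - k) := by
      by_cases hlt : k < grid.length - 1
      · have h1 : grid.length - 1 - k = (grid.length - 1 - (k + 1)) + 1 := by omega
        have h2 : grid.length - 1 - (grid.length - 1 - (k + 1)) = k + 1 := by omega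
        rw [if_pos hlt, h1, specD, h2]
      · have h3 : grid.length - 1 - (k + 1) = grid.length - 1 - k := by omega
        rw [if_neg hlt, h3]
    rw [hrev]
    simp only [List.foldl_cons]
    rw [hstep, ih (by omega) (acc0 ++ [specD grid b (grid.length - 1 - k)])]
    have hmap : (List.range (k + 1)).map (fun t => specD grid b (grid.length - (k + 1) + t)) =
        specD grid b (grid.length - 1 - k) ::
          (List.range k).map (fun t => specD grid b (grid.length - k + t)) := by
      rw [List.range_succ_eq_map, List.map_cons, List.map_map]
      congr 1
      · congr 1; omega
      · apply List.map_congr_left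
        intro t _
        simp only [Function.comp]
        congr 1
        omega
    rw [hmap]
    simp

theorem nearDown_getD (grid : List (List String)) (b : Int) (i : Nat) (hi : i < grid.length) :
    (nearDown grid b grid.length (grid.headD []).length).getD i [] =
      specD grid b (grid.length - 1 - i) := by
  rw [nearDown]
  have h0 : grid.length - 1 - grid.length = 0 := by omega
  have hpair := nearDown_pair grid b grid.length le_rfl []
  rw [h0] at hpair
  have hrepl : specD grid b 0 = List.replicate (grid.headD []).length none := rfl
  rw [← hrepl, hpair]
  rw [List.getD_eq_getElem?_getD, List.getElem?_reverse (by simpa using hi), List.nil_append]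
  have hlen : ((List.range grid.length).map
      (fun t => specD grid b (grid.length - grid.length + t))).length = grid.length := by simp
  rw [hlen]
  rw [List.getElem?_map, List.getElem?_range (by omega)]
  simp only [Option.map_some, Option.getD_some]
  congr 1
  omega

theorem nearLeft_pair (row : List String) : ∀ k,
    ((List.range k).foldl
      (fun (st : List (Option String) × Option String) j =>
        (st.1 ++ [st.2], if row.getD j "" ≠ "." then some (row.getD j "") else st.2))
      ([], none))
    = ((List.range k).map (specL row), specL row k) := by
  intro k
  induction k with
  | zero => simp [specL]
  | succ k ih =>
    rw [List.range_succ, List.foldl_append, ih]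
    simp only [List.foldl]
    rw [List.map_append]
    exact Prod.ext rfl rfl

theorem nearLeft_getD (row : List String) (m j : Nat) (hj : j < m) :
    (nearLeft row m).getD j none = specL row j := by
  rw [nearLeft, nearLeft_pair row m, getD_map_range' _ _ j none hj]

theorem nearRight_pair (row : List String) (m : Nat) : ∀ k, k ≤ m →
    ∀ acc0 : List (Option String),
    ((List.range k).reverse.foldl
      (fun (st : List (Option String) × Option String) j =>
        (st.1 ++ [st.2], if row.getD j "" ≠ "." then some (row.getD j "") else st.2))
      (acc0, specR row m (m - k)))
    = (acc0 ++ (List.range k).map (fun t => specR row m (m - k + t)), specR row m m) := by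
  intro k
  induction k with
  | zero => intro _ acc0; simp
  | succ k ih =>
    intro hk acc0
    have hrev : (List.range (k + 1)).reverse = k :: (List.range k).reverse := by
      rw [List.range_succ]; simp
    have hstep : (if row.getD k "" ≠ "." then some (row.getD k "")
        else specR row m (m - (k + 1))) = specR row m (m - k) := by
      have h1 : m - k = (m - (k + 1)) + 1 := by omega
      have h2 : m - 1 - (m - (k + 1)) = k := by omega
      rw [h1, specR, h2]
    rw [hrev]
    simp only [List.foldl_cons]
    rw [hstep, ih (by omega) (acc0 ++ [specR row m (m - (k + 1))])]
    have hmap : (List.range (k + 1)).map (fun t => specR row m (m - (k + 1) + t)) =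
        specR row m (m - (k + 1)) ::
          (List.range k).map (fun t => specR row m (m - k + t)) := by
      rw [List.range_succ_eq_map, List.map_cons, List.map_map]
      congr 1
      apply List.map_congr_left
      intro t _
      simp only [Function.comp]
      congr 1
      omega
    rw [hmap]
    simp

theorem nearRight_getD (row : List String) (m j : Nat) (hj : j < m) :
    (nearRight row m).getD j none = specR row m (m - 1 - j) := by
  rw [nearRight]
  have h0 : specR row m (m - m) = none := by
    have : m - m = 0 := by omega
    rw [this]; rfl
  have hpair := nearRight_pair row m m le_rfl []
  rw [← h0, hpair]
  rw [List.getD_eq_getElem?_getD, List.getElem?_reverse (by simpa using hj), List.nil_append]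
  have hlen : ((List.range m).map (fun t => specR row m (m - m + t))).length = m := by simp
  rw [hlen, List.getElem?_map, List.getElem?_range (by omega)]
  simp only [Option.map_some, Option.getD_some]
  congr 1
  omega

theorem getElem?_set_self' {α : Type} (l : List α) (i : Nat) (a : α) :
    (l.set i a)[i]? = (l[i]?).map (fun _ => a) := by
  rw [List.getElem?_set]
  by_cases h : i < l.length
  · simp [h]
  · have hn : l[i]? = none := List.getElem?_eq_none_iff.mpr (by omega)
    simp [h, hn]

theorem map_getD_self {α : Type} (row : List α) (j : Nat) (d : α) :
    (row[j]?).map (fun _ => row.getD j d) = row[j]? := by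
  cases h : row[j]? with
  | none => rfl
  | some v => simp [List.getD_eq_getElem?_getD, h]

theorem foldl_set_range {α : Type} (mb : Nat) (step : List α → Nat → List α) (val : Nat → α)
    (row : List α)
    (hother : ∀ r (j j' : Nat), j' ≠ j → (step r j)[j']? = r[j']?)
    (hval : ∀ r (j : Nat), j < mb → r[j]? = row[j]? →
      (step r j)[j]? = (row[j]?).map (fun _ => val j)) :
    ∀ m : Nat, m ≤ mb → ∀ j : Nat, ((List.range m).foldl step row)[j]? =
      if j < m then (row[j]?).map (fun _ => val j) else row[j]? := by
  intro m
  induction m with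
  | zero => intro _ j; simp
  | succ m ih =>
    intro hm j
    rw [List.range_succ, List.foldl_append]
    simp only [List.foldl]
    by_cases hj : j = m
    · subst hj
      rw [hval _ j (by omega) (by rw [ih (by omega) j]; simp), if_pos (by omega)]
    · rw [hother _ m j hj, ih (by omega) j]
      simp only [show (j < m + 1) ↔ (j < m) from by omega]

def valA (grid : List (List String)) (i j : Nat) : String :=
  if pvCell grid (i : Int) (j : Int) = "L" ∧ count_grid_2 grid (i : Int) (j : Int) "#" = 0 then
    "#"
  else if pvCell grid (i : Int) (j : Int) = "#" ∧
      5 ≤ count_grid_2 grid (i : Int) (j : Int) "#" then "L"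
  else (grid.getD i []).getD j ""

def rstepA (grid : List (List String)) (i : Nat) (r : List String) (j : Nat) : List String :=
  let r2 := if pvCell grid (i : Int) (j : Int) = "L" ∧
      count_grid_2 grid (i : Int) (j : Int) "#" = 0 then r.set j "#" else r
  if pvCell grid (i : Int) (j : Int) = "#" ∧
      5 ≤ count_grid_2 grid (i : Int) (j : Int) "#" then r2.set j "L" else r2

theorem rstepA_other (grid : List (List String)) (i : Nat) (r : List String) (j j' : Nat)
    (h : j' ≠ j) : (rstepA grid i r j)[j']? = r[j']? := by
  rw [rstepA]
  split_ifs <;> simp [List.getElem?_set_ne (Ne.symm h)]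

theorem rstepA_val (grid : List (List String)) (i : Nat) (r : List String) (j : Nat)
    (h : r[j]? = (grid.getD i [])[j]?) :
    (rstepA grid i r j)[j]? = ((grid.getD i [])[j]?).map (fun _ => valA grid i j) := by
  rw [rstepA, valA]
  by_cases c1 : pvCell grid (i : Int) (j : Int) = "L" ∧
      count_grid_2 grid (i : Int) (j : Int) "#" = 0
  · have c2 : ¬ (pvCell grid (i : Int) (j : Int) = "#" ∧
        5 ≤ count_grid_2 grid (i : Int) (j : Int) "#") := by
      intro hc
      rw [c1.1] at hc
      exact absurd hc.1 (by decide)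
    rw [if_pos c1, if_neg c2, if_pos c1, getElem?_set_self', h]
  · by_cases c2 : pvCell grid (i : Int) (j : Int) = "#" ∧
        5 ≤ count_grid_2 grid (i : Int) (j : Int) "#"
    · rw [if_neg c1, if_pos c2, if_neg c1, if_pos c2, getElem?_set_self', h]
    · rw [if_neg c1, if_neg c2, if_neg c1, if_neg c2, h, map_getD_self]

theorem set_noop {α : Type} [Inhabited α] (g : List α) (i : Nat) (X : α)
    (h : ¬ i < g.length) : g.set i X = g := by
  apply List.ext_getElem?
  intro j
  rw [List.getElem?_set]
  split_ifs with h1 h2 <;> simp_all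

theorem set_getD_self (g : List (List String)) (i : Nat) : g.set i (g.getD i []) = g := by
  by_cases h : i < g.length
  · rw [List.getD_eq_getElem _ _ h]
    exact List.set_getElem_self h
  · exact set_noop g i _ h

theorem set_get?D (g : List (List String)) (i : Nat) (X : List String) (h : i < g.length) :
    (g.set i X)[i]?.getD [] = X := by
  rw [getElem?_set_self', List.getElem?_eq_getElem h]
  rfl

theorem innerA (grid : List (List String)) (i : Nat) : ∀ (l : List Nat)
    (g : List (List String)),
    l.foldl (fun g2 (j : Nat) =>
      let g2 := if pvCell grid (i : Int) (j : Int) = "L" ∧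
          count_grid_2 grid (i : Int) (j : Int) "#" = 0 then
          g2.set i ((g2.getD i []).set j "#") else g2
      if pvCell grid (i : Int) (j : Int) = "#" ∧
          5 ≤ count_grid_2 grid (i : Int) (j : Int) "#" then
        g2.set i ((g2.getD i []).set j "L") else g2) g
    = g.set i (l.foldl (rstepA grid i) (g.getD i [])) := by
  intro l
  induction l with
  | nil => intro g; exact (set_getD_self g i).symm
  | cons j l ih =>
    intro g
    simp only [List.foldl_cons]
    rw [ih]
    by_cases hlen : i < g.length
    · clear ih
      split_ifs <;> simp_all [rstepA, set_get?D _ _ _ hlen, List.set_set] <;>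
        rw [if_neg (by rintro ⟨p, q⟩ <;> simp_all <;> omega),
            if_neg (by rintro ⟨p, q⟩ <;> simp_all <;> omega)]
    · clear ih
      split_ifs <;> simp_all [rstepA, set_noop _ _ _ hlen]


theorem A_getElem? (grid : List (List String)) (i : Nat) :
    (iterate_grid_2 grid)[i]? =
      if i < grid.length then
        (grid[i]?).map (fun _ =>
          (List.range (grid.headD []).length).foldl (rstepA grid i) (grid.getD i []))
      else grid[i]? := by
  have h1 : iterate_grid_2 grid = (List.range grid.length).foldl
      (fun g (i : Nat) => g.set i ((List.range (grid.headD []).length).foldl (rstepA grid i)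
        (g.getD i []))) grid := by
    simp only [iterate_grid_2, List.map_id']
    congr 1
    funext g i
    exact innerA grid i (List.range (grid.headD []).length) g
  rw [h1]
  exact foldl_set_range grid.length _
    (fun i => (List.range (grid.headD []).length).foldl (rstepA grid i) (grid.getD i []))
    grid
    (fun r j j' h => List.getElem?_set_ne (Ne.symm h))
    (fun r j _ hr => by
      rw [getElem?_set_self', hr, List.getD_eq_getElem?_getD, hr,
        ← List.getD_eq_getElem?_getD])
    grid.length le_rfl i

theorem if_ind (grid : List (List String)) (a b x y : Int) (s : Int) :
    (if vis grid a b x y = some "#" then s + 1 else s) = s + ind grid a b x y := by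
  rw [ind]
  split_ifs <;> omega

theorem lookU (grid : List (List String)) (b : Int) (i j : Nat) (hi : i < grid.length)
    (hj : j < (grid.headD []).length) :
    PySem.List.pyGetD (PySem.List.pyGetD
        (nearUp grid b grid.length (grid.headD []).length) ((0 : Int) + (i : Int)) [])
      ((j : Int)) none = vis grid (-1) b (i : Int) (j : Int) := by
  rw [zero_add, PySem.List.pyGetD_natCast, PySem.List.pyGetD_natCast,
      nearUp_getD grid b i hi, specU_getD grid b i (by omega) j hj]

theorem lookD (grid : List (List String)) (b : Int) (i j : Nat) (hi : i < grid.length)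
    (hj : j < (grid.headD []).length) :
    PySem.List.pyGetD (PySem.List.pyGetD
        (nearDown grid b grid.length (grid.headD []).length) ((0 : Int) + (i : Int)) [])
      ((j : Int)) none = vis grid 1 b (i : Int) (j : Int) := by
  rw [zero_add, PySem.List.pyGetD_natCast, PySem.List.pyGetD_natCast,
      nearDown_getD grid b i hi,
      specD_getD grid b (grid.length - 1 - i) (by omega) j hj]
  congr 1
  omega

theorem lookL (grid : List (List String)) (i j : Nat) (hi : i < grid.length)
    (hj : j < (grid.headD []).length) :
    PySem.List.pyGetD (PySem.List.pyGetD
        (grid.map (fun row => nearLeft row (grid.headD []).length)) ((0 : Int) + (i : Int)) [])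
      ((j : Int)) none = vis grid 0 (-1) (i : Int) (j : Int) := by
  have houter : (grid.map (fun row => nearLeft row (grid.headD []).length)).getD i [] =
      nearLeft (grid.getD i []) (grid.headD []).length := by
    rw [List.getD_eq_getElem?_getD, List.getElem?_map, List.getElem?_eq_getElem hi]
    simp only [Option.map_some, Option.getD_some]
    rw [← List.getD_eq_getElem grid [] hi]
  rw [zero_add, PySem.List.pyGetD_natCast, PySem.List.pyGetD_natCast, houter,
      nearLeft_getD _ _ j hj, specL_eq grid i hi j (by omega)]

theorem lookR (grid : List (List String)) (i j : Nat) (hi : i < grid.length)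
    (hj : j < (grid.headD []).length) :
    PySem.List.pyGetD (PySem.List.pyGetD
        (grid.map (fun row => nearRight row (grid.headD []).length)) ((0 : Int) + (i : Int)) [])
      ((j : Int)) none = vis grid 0 1 (i : Int) (j : Int) := by
  have houter : (grid.map (fun row => nearRight row (grid.headD []).length)).getD i [] =
      nearRight (grid.getD i []) (grid.headD []).length := by
    rw [List.getD_eq_getElem?_getD, List.getElem?_map, List.getElem?_eq_getElem hi]
    simp only [Option.map_some, Option.getD_some]
    rw [← List.getD_eq_getElem grid [] hi]
  rw [zero_add, PySem.List.pyGetD_natCast, PySem.List.pyGetD_natCast, houter,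
      nearRight_getD _ _ j hj,
      specR_eq grid i hi ((grid.headD []).length - 1 - j) (by omega)]
  congr 1
  omega

theorem cnt_eq (grid : List (List String)) (i j : Nat) (hi : i < grid.length)
    (hj : j < (grid.headD []).length) :
    List.foldl (fun (s : Int) mat =>
      if PySem.List.pyGetD (PySem.List.pyGetD mat ((0 : Int) + (i : Int)) []) ((j : Int)) none
          = some "#" then s + 1 else s) 0
      ([nearUp grid (-1) grid.length (grid.headD []).length,
        nearDown grid (-1) grid.length (grid.headD []).length,
        nearUp grid 0 grid.length (grid.headD []).length,
        nearDown grid 0 grid.length (grid.headD []).length,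
        nearUp grid 1 grid.length (grid.headD []).length,
        nearDown grid 1 grid.length (grid.headD []).length,
        grid.map (fun row => nearLeft row (grid.headD []).length),
        grid.map (fun row => nearRight row (grid.headD []).length)])
    = count_grid_2 grid (i : Int) (j : Int) "#" := by
  simp only [List.foldl]
  rw [lookU grid (-1) i j hi hj, lookU grid 0 i j hi hj, lookU grid 1 i j hi hj,
      lookD grid (-1) i j hi hj, lookD grid 0 i j hi hj, lookD grid 1 i j hi hj,
      lookL grid i j hi hj, lookR grid i j hi hj]
  simp only [if_ind]
  rw [countA grid (i : Int) (j : Int) (by omega) (by rw [pvN_eq]; omega) (by omega)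
      (by rw [pvM_eq]; omega)]
  ring

theorem mats_eq (grid : List (List String)) :
    ([(-1 : Int), 0, 1]).foldl
      (fun ms b => ms ++ [nearUp grid b grid.length (grid.headD []).length,
        nearDown grid b grid.length (grid.headD []).length]) [] =
    [nearUp grid (-1) grid.length (grid.headD []).length,
     nearDown grid (-1) grid.length (grid.headD []).length,
     nearUp grid 0 grid.length (grid.headD []).length,
     nearDown grid 0 grid.length (grid.headD []).length,
     nearUp grid 1 grid.length (grid.headD []).length,
     nearDown grid 1 grid.length (grid.headD []).length] := rfl

theorem pvCell_getD (grid : List (List String)) (i j : Nat) :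
    pvCell grid (i : Int) (j : Int) = (grid.getD i []).getD j "" := by
  rw [pvCell_eq grid i _ (by omega), PySem.List.pyGetD_natCast]

theorem main_eq (grid : List (List String)) :
    iterate_grid_2 grid = iterate_grid_2_alt grid := by
  apply List.ext_getElem?
  intro i
  rw [A_getElem? grid i]
  simp only [iterate_grid_2_alt]
  simp only [mats_eq grid]
  simp only [List.cons_append, List.nil_append, List.getElem?_map,
    PySem.List.getElem?_enumerate, Option.map_map]
  by_cases hi : i < grid.length
  · rw [if_pos hi, List.getElem?_eq_getElem hi]
    simp only [Option.map_some, Function.comp_apply]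
    rw [← List.getD_eq_getElem grid [] hi]
    congr 1
    apply List.ext_getElem?
    intro j
    refine (foldl_set_range (grid.headD []).length _ (fun j => valA grid i j)
        (grid.getD i []) (rstepA_other grid i) (fun r j _ hr => rstepA_val grid i r j hr)
        (grid.headD []).length le_rfl j).trans
      (foldl_set_range (grid.headD []).length _ (fun j => valA grid i j)
        (grid.getD i []) ?ho ?hv (grid.headD []).length le_rfl j).symm
    case ho =>
      intro r j j' h
      beta_reduce
      split_ifs <;> first | rfl | exact List.getElem?_set_ne (Ne.symm h)
    case hv =>
      intro r j hjm hr
      beta_reduce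
      simp only [cnt_eq grid i j hi hjm]
      simp only [← pvCell_getD grid i j]
      by_cases c1 : pvCell grid (i : Int) (j : Int) = "L" ∧
          count_grid_2 grid (i : Int) (j : Int) "#" = 0
      · rw [if_pos c1, getElem?_set_self', hr]
        unfold valA
        rw [if_pos c1]
      · by_cases c2 : pvCell grid (i : Int) (j : Int) = "#" ∧
            5 ≤ count_grid_2 grid (i : Int) (j : Int) "#"
        · rw [if_neg c1, if_pos c2, getElem?_set_self', hr]
          unfold valA
          rw [if_neg c1, if_pos c2]
        · rw [if_neg c1, if_neg c2, hr]
          unfold valA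
          rw [if_neg c1, if_neg c2, map_getD_self]
  · rw [if_neg hi]
    have hn : grid[i]? = none := List.getElem?_eq_none_iff.mpr (by omega)
    rw [hn]
    rfl

-- ===== VERDICT (by name: the statement is the Claim_ definition above) =====
theorem iterate_grid_2_spec : Claim_equal_iterate_grid_2 := by
  intro grid _ _
  rw [Spec_iterate_grid_2]
  exact main_eq grid
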